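-- pv_equiv track=rewrite | github.com/delguoqing/LMDumper | src/swf_helper.py | calc_nbits
-- ===== SOURCE A (Python) =====
-- def calc_nbits(v):
-- 	v = abs(v)
-- 	if v == 0:
-- 		return 0
-- 	else:
-- 		nbits = 0
-- 		while v != 0:
-- 			v >>= 1
-- 			nbits += 1
-- 		nbits += 1
-- 	return nbits
-- ===== SOURCE B (Python) =====
-- def calc_nbits(v):
--     v = abs(v)
--     if v == 0:
--         return 0
--     return v.bit_length() + 1
-- ===== Notes on version B (the rewrite author's own statement) =====
-- stated objective: idiomatic
-- what changed: The per-bit while-loop counting shifts is replaced by a closed-form int.bit_length() call plus 1, keeping the v == 0 special case.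
import Mathlib
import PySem

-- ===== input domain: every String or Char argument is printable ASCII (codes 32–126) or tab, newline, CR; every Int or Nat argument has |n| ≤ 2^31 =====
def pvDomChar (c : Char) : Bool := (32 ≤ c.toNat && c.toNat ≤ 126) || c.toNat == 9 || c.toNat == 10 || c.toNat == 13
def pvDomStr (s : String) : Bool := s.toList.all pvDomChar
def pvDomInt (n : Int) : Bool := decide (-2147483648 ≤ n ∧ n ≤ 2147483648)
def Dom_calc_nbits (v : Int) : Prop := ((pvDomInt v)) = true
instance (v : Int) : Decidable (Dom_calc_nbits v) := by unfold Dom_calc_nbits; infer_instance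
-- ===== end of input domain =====

-- B replaces A's per-bit while-loop with bit_length() + 1 (kept special case at 0); return-value equivalence, no side effects involved.

-- ===== PORT A =====
-- the while loop `while v != 0: v >>= 1; nbits += 1`, on the nonnegative v = abs(v)
def calcNbitsLoop (n : Nat) (nbits : Nat) : Nat :=
  if n = 0 then nbits else calcNbitsLoop (n / 2) (nbits + 1)
decreasing_by exact Nat.div_lt_self (Nat.pos_of_ne_zero (by assumption)) (by norm_num)

def calc_nbits (v : Int) : Int :=
  let n := v.natAbs
  if n = 0 then 0
  else ((calcNbitsLoop n 0 : Int) + 1)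

-- ===== PORT B =====
-- Nat.size is Lean's counterpart of Python's int.bit_length() on nonnegative ints
def calc_nbits_alt (v : Int) : Int :=
  let n := v.natAbs
  if n = 0 then 0
  else ((Nat.size n : Int) + 1)

-- ===== PRECONDITION & SPEC =====
def Spec_calc_nbits (v : Int) (out : Int) : Prop := out = calc_nbits_alt v
instance (v : Int) (out : Int) : Decidable (Spec_calc_nbits v out) := by unfold Spec_calc_nbits; infer_instance

-- ===== CLAIM (what is proved, stated in full; the proofs are below) =====
def Claim_equal_calc_nbits : Prop := ∀ (v : Int), Dom_calc_nbits v → Spec_calc_nbits v (calc_nbits v)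

-- ===== LEMMAS AND PROOFS =====
theorem size_succ_div_two (n : Nat) (h : n ≠ 0) : n.size = (n / 2).size + 1 := by
  conv_lhs => rw [← Nat.bit_bodd_div2 n]
  rw [Nat.size_bit (by rw [Nat.bit_bodd_div2]; exact h), Nat.div2_val]

theorem calcNbitsLoop_eq (n : Nat) : ∀ k, calcNbitsLoop n k = n.size + k := by
  induction n using Nat.strong_induction_on with
  | _ n ih =>
    intro k
    rw [calcNbitsLoop]
    by_cases h : n = 0
    · simp [h]
    · rw [if_neg h, ih (n / 2) (Nat.div_lt_self (Nat.pos_of_ne_zero h) (by norm_num)),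
        size_succ_div_two n h]
      omega

-- ===== VERDICT (by name: the statement is the Claim_ definition above) =====
theorem calc_nbits_spec : Claim_equal_calc_nbits := by
  intro v _
  unfold Spec_calc_nbits calc_nbits calc_nbits_alt
  by_cases h : v.natAbs = 0
  · simp [h]
  · simp [h, calcNbitsLoop_eq]
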